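-- pv_equiv track=rewrite | github.com/heyashy/horcrux | horcrux/characters.py | claim_single_word_clusters
-- ===== SOURCE A (Python) =====
-- from collections import Counter, defaultdict
--
-- _GENERIC_TITLES = frozenset({
--     "mr.", "mr", "mrs.", "mrs", "miss", "ms.", "ms", "master",
--     "lord", "lady", "sir", "madam", "madame",
--     "aunt", "uncle", "auntie",
--     "professor", "prof.", "prof", "dr.", "dr", "doctor",
--     "the", "a", "an",
--     "father", "mother", "dad", "mom", "mum", "daddy", "mommy", "mummy",
--     "boy", "girl", "man", "woman", "kid", "child",
-- })
--
-- def _significant_tokens(name: str) -> set[str]: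
--     """Lowercased tokens with generic titles + articles stripped.
--
--     `Mr. Filch`         → {'filch'}
--     `Aunt Petunia`      → {'petunia'}
--     `the boy`           → {} (all generic)
--     `Albus Dumbledore`  → {'albus', 'dumbledore'}
--     """
--     return {t for t in name.lower().split() if t not in _GENERIC_TITLES}
--
-- def claim_single_word_clusters(
--     clusters: dict[str, list[str]],
-- ) -> dict[str, list[str]]:
--     """Merge single-word clusters into multi-word clusters that *uniquely*
--     own them as a significant token.
--
--     Rule:
--       A single-word cluster `S` merges into a multi-word cluster `M` iff
--       both of:
--         - `S`'s canonical contains exactly one significant (non-generic)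
--           token `t`
--         - exactly one multi-word cluster's canonical contains `t` as one
--           of its significant tokens
--
--     The "exactly one" gate is what distinguishes a personal name (only
--     one multi-word cluster owns it — `Hermione` → `Hermione Granger`)
--     from a family/group name (multiple multi-word clusters share it —
--     `Weasley` is part of `Ron Weasley`, `Fred Weasley`, ... ; ambiguous,
--     don't merge).
--
--     Canonical preference: when merging, the multi-word form wins. Yields
--     human-readable cluster names in reports (`Harry Potter`, not `Harry`)
--     even though the single-word has higher frequency. Aliases from the
--     single-word cluster are appended.
--
--     Pure function; doesn't mutate input. Order of execution within a
--     single discovery run doesn't matter — uses the original cluster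
--     membership snapshot, not a live-mutating one.
--     """
--     # Index: significant_token → list of multi-word CANONICALS containing it.
--     multiword_owners: dict[str, list[str]] = defaultdict(list)
--     for canonical in clusters:
--         if len(canonical.split()) > 1:
--             for token in _significant_tokens(canonical):
--                 multiword_owners[token].append(canonical)
--
--     new_clusters = {k: list(v) for k, v in clusters.items()}
--
--     for canonical in list(clusters.keys()):
--         if len(canonical.split()) != 1:
--             continue
--         sig_tokens = _significant_tokens(canonical)
--         if len(sig_tokens) != 1:
--             continue
--         token = next(iter(sig_tokens))
--         owners = multiword_owners.get(token, [])
--         if len(owners) != 1: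
--             continue
--
--         target = owners[0]
--         if target not in new_clusters or canonical not in new_clusters:
--             continue
--
--         for alias in new_clusters[canonical]:
--             if alias not in new_clusters[target]:
--                 new_clusters[target].append(alias)
--         del new_clusters[canonical]
--
--     return new_clusters
-- ===== SOURCE B (Python) =====
-- from collections import defaultdict
--
-- _GENERIC_TITLES = frozenset({
--     "mr.", "mr", "mrs.", "mrs", "miss", "ms.", "ms", "master",
--     "lord", "lady", "sir", "madam", "madame",
--     "aunt", "uncle", "auntie",
--     "professor", "prof.", "prof", "dr.", "dr", "doctor",
--     "the", "a", "an",
--     "father", "mother", "dad", "mom", "mum", "daddy", "mommy", "mummy",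
--     "boy", "girl", "man", "woman", "kid", "child",
-- })
--
-- def _significant_tokens(name: str) -> set[str]:
--     return {t for t in name.lower().split() if t not in _GENERIC_TITLES}
--
-- def claim_single_word_clusters(
--     clusters: dict[str, list[str]],
-- ) -> dict[str, list[str]]:
--     """Plan-then-rebuild variant: compute every merge first, then build the
--     result dict fresh in one pass over the original clusters."""
--     # token -> multi-word canonicals owning it
--     owners: dict[str, list[str]] = defaultdict(list)
--     for canonical in clusters:
--         if len(canonical.split()) > 1:
--             for token in _significant_tokens(canonical):
--                 owners[token].append(canonical)
--
--     # single-word canonical -> its unique multi-word target, and the reverse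
--     # grouping target -> mergers (in original key order)
--     plan: dict[str, str] = {}
--     incoming: dict[str, list[str]] = defaultdict(list)
--     for canonical in clusters:
--         if len(canonical.split()) == 1:
--             sig = _significant_tokens(canonical)
--             if len(sig) == 1:
--                 cands = owners.get(next(iter(sig)), [])
--                 if len(cands) == 1:
--                     plan[canonical] = cands[0]
--                     incoming[cands[0]].append(canonical)
--
--     result: dict[str, list[str]] = {}
--     for canonical, aliases in clusters.items():
--         if canonical in plan:
--             continue  # merged away
--         merged = list(aliases)
--         if len(canonical.split()) > 1:
--             seen = set(merged)
--             for single in incoming.get(canonical, []):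
--                 for alias in clusters[single]:
--                     if alias not in seen:
--                         merged.append(alias)
--                         seen.add(alias)
--         result[canonical] = merged
--     return result
-- ===== Notes on version B (the rewrite author's own statement) =====
-- stated objective: alternative
-- what changed: A merges by mutating a copy of the dict in place (appending into the live target list and deleting merged keys as it scans); B first computes a complete merge plan (single->target, grouped target->mergers) and then builds the result dict fresh in one pass, deduplicating appended aliases with a seen-set instead of repeated list membership scans.
import Mathlib
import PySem

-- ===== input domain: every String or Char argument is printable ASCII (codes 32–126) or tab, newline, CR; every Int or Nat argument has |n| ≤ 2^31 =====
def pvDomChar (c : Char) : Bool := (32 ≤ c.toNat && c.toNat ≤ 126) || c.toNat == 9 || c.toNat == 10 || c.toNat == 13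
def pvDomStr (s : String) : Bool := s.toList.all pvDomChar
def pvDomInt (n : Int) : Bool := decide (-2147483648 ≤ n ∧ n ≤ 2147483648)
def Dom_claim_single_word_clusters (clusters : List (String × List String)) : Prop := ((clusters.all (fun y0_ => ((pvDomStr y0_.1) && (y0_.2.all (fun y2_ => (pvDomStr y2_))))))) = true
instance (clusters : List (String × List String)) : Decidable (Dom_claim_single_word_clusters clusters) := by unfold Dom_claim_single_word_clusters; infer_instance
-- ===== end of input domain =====

-- B rebuilds the result in one fresh pass from a precomputed merge plan (grouped by target, set-based dedup)
-- instead of A's in-place mutate-and-delete loop; objective: alternative decomposition (similar cost).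

-- ===== PORT A =====
def pvGeneric : List String := ["mr.", "mr", "mrs.", "mrs", "miss", "ms.", "ms", "master",
    "lord", "lady", "sir", "madam", "madame",
    "aunt", "uncle", "auntie",
    "professor", "prof.", "prof", "dr.", "dr", "doctor",
    "the", "a", "an",
    "father", "mother", "dad", "mom", "mum", "daddy", "mommy", "mummy",
    "boy", "girl", "man", "woman", "kid", "child"]

-- _significant_tokens: set comprehension over the lowercased split, generic titles dropped
def pvSig (name : String) : PySem.Set String :=
  PySem.Set.ofList ((PySem.Str.split₀ (PySem.Str.lower name)).filter (fun t => !pvGeneric.contains t))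

-- len(name.split())
def pvNumWords (s : String) : Nat := (PySem.Str.split₀ s).length

-- the multiword_owners index (built identically by A and by B)
def pvOwners (clusters : List (String × List String)) : PySem.Dict String (List String) :=
  clusters.foldl (fun d p =>
    if pvNumWords p.1 > 1 then
      (pvSig p.1).foldl (fun d t => d.modify t [] (fun l => l ++ [p.1])) d
    else d) PySem.Dict.empty

-- 'if alias not in new_clusters[target]: new_clusters[target].append(alias)'
def pvDD (acc : List String) (x : String) : List String := if x ∈ acc then acc else acc ++ [x]

-- body of A's merge loop over list(clusters.keys())
def pvStepA (ow : PySem.Dict String (List String)) (d : PySem.Dict String (List String))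
    (canonical : String) : PySem.Dict String (List String) :=
  if pvNumWords canonical ≠ 1 then d else
  let sig := pvSig canonical
  if sig.length ≠ 1 then d else
  let token := sig.headD ""
  let owners := ow.getD token []
  if owners.length ≠ 1 then d else
  let target := owners.headD ""
  if !(d.contains target) || !(d.contains canonical) then d else
  (d.modify target [] (fun tl => (d.getD canonical []).foldl pvDD tl)).erase canonical

def claim_single_word_clusters (clusters : List (String × List String)) : List (String × List String) :=
  let ow := pvOwners clusters
  let new0 := PySem.Dict.ofList clusters
  ((clusters.map Prod.fst).foldl (pvStepA ow) new0).items

-- ===== PORT B =====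
-- 'if alias not in seen: merged.append(alias); seen.add(alias)' on the (merged, seen) pair
def pvMStep (ms : List String × PySem.Set String) (a : String) : List String × PySem.Set String :=
  if ms.2.contains a then ms else (ms.1 ++ [a], PySem.Set.add ms.2 a)

-- merge the incoming singles' aliases into this multi-word cluster's alias list, seen-set dedup
def pvMergeB (cl : PySem.Dict String (List String)) (incoming : PySem.Dict String (List String))
    (canonical : String) (aliases : List String) : List String :=
  ((incoming.getD canonical []).foldl
    (fun (ms : List String × PySem.Set String) s => (cl.getD s []).foldl pvMStep ms)
    (aliases, PySem.Set.ofList aliases)).1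

def claim_single_word_clusters_alt (clusters : List (String × List String)) : List (String × List String) :=
  let ow := pvOwners clusters
  -- plan: single-word canonical → its unique target; incoming: target → mergers (in key order)
  let pi := clusters.foldl
    (fun (pi : PySem.Dict String String × PySem.Dict String (List String)) p =>
      if pvNumWords p.1 = 1 then
        let sig := pvSig p.1
        if sig.length = 1 then
          let cands := ow.getD (sig.headD "") []
          if cands.length = 1 then
            (pi.1.insert p.1 (cands.headD ""), pi.2.modify (cands.headD "") [] (fun l => l ++ [p.1]))
          else pi
        else pi
      else pi)
    (PySem.Dict.empty, PySem.Dict.empty)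
  let cl := PySem.Dict.ofList clusters
  (clusters.foldl
    (fun (res : PySem.Dict String (List String)) p =>
      if pi.1.contains p.1 then res
      else res.insert p.1 (if pvNumWords p.1 > 1 then pvMergeB cl pi.2 p.1 p.2 else p.2))
    PySem.Dict.empty).items

-- ===== PRECONDITION & SPEC =====
-- Pre_ only states that the association list represents a Python dict: its keys are pairwise
-- distinct (a Python dict can never present duplicate keys, so this excludes no actual input of A).
def Pre_claim_single_word_clusters (clusters : List (String × List String)) : Prop :=
  (clusters.map Prod.fst).Nodup
instance (clusters : List (String × List String)) : Decidable (Pre_claim_single_word_clusters clusters) := by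
  unfold Pre_claim_single_word_clusters; infer_instance

def pvWitness_claim_single_word_clusters : (List (String × List String)) :=
  [("Harry Potter", ["Harry Potter", "Potter"]), ("Harry", ["the boy", "Harry Potter"]), ("Weasley", ["Ron"])]

def Spec_claim_single_word_clusters (clusters : List (String × List String)) (out : List (String × List String)) : Prop := out = claim_single_word_clusters_alt clusters
instance (clusters : List (String × List String)) (out : List (String × List String)) : Decidable (Spec_claim_single_word_clusters clusters out) := by unfold Spec_claim_single_word_clusters; infer_instance

-- ===== CLAIM (what is proved, stated in full; the proofs are below) =====
def Claim_equal_claim_single_word_clusters : Prop := ∀ (clusters : List (String × List String)), Dom_claim_single_word_clusters clusters → Pre_claim_single_word_clusters clusters → Spec_claim_single_word_clusters clusters (claim_single_word_clusters clusters)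

-- ===== LEMMAS AND PROOFS =====

-- the pure merge decision both programs compute for a canonical
def pvPlan (ow : PySem.Dict String (List String)) (k : String) : Option String :=
  if pvNumWords k ≠ 1 then none else
  if (pvSig k).length ≠ 1 then none else
  if ((ow.getD ((pvSig k).headD "") []).length ≠ 1) then none else
  some ((ow.getD ((pvSig k).headD "") []).headD "")

-- alias lists of the already-processed singles that merge into k, in cluster order
def pvAdd (ow : PySem.Dict String (List String)) (cs : List (String × List String))
    (P : List String) (k : String) : List (List String) :=
  (cs.filter (fun q => decide (q.1 ∈ P) && (pvPlan ow q.1 == some k))).map Prod.snd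

def pvVal (ow : PySem.Dict String (List String)) (cs : List (String × List String))
    (P : List String) (p : String × List String) : List String :=
  (pvAdd ow cs P p.1).foldl (fun acc vs => vs.foldl pvDD acc) p.2

-- the state of A's dict after processing the keys in P (as an item list)
def pvModel (ow : PySem.Dict String (List String)) (cs : List (String × List String))
    (P : List String) : List (String × List String) :=
  cs.filterMap (fun p =>
    if decide (p.1 ∈ P) && (pvPlan ow p.1).isSome then none
    else some (p.1, pvVal ow cs P p))

theorem pvOfList_items {cs : List (String × List String)}
    (h : (cs.map Prod.fst).Nodup) : (PySem.Dict.ofList cs).items = cs := by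
  have := PySem.Dict.items_foldl_insert_fresh cs Prod.fst Prod.snd PySem.Dict.empty
    (by intro a _; simp [pysem]) h
  simpa [PySem.Dict.ofList, PySem.Dict.update] using this

theorem pvOfList_eq_mk {cs : List (String × List String)}
    (h : (cs.map Prod.fst).Nodup) : PySem.Dict.ofList cs = PySem.Dict.mk cs :=
  PySem.Dict.ext (by rw [pvOfList_items h])

theorem pvOwners_aux (cs : List (String × List String))
    (d : PySem.Dict String (List String)) (t x : String)
    (h : x ∈ (cs.foldl (fun d p =>
        if pvNumWords p.1 > 1 then
          (pvSig p.1).foldl (fun d t => d.modify t [] (fun l => l ++ [p.1])) d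
        else d) d).getD t []) :
    x ∈ d.getD t [] ∨ ∃ p ∈ cs, p.1 = x ∧ pvNumWords p.1 > 1 := by
  induction cs generalizing d with
  | nil => simpa using h
  | cons p cs ih =>
    simp only [List.foldl_cons] at h
    rcases ih _ h with h' | ⟨q, hq, rfl, hm⟩
    · by_cases hp : pvNumWords p.1 > 1
      · rw [if_pos hp] at h'
        have heq : (pvSig p.1).foldl (fun d t => d.modify t [] (fun l => l ++ [p.1])) d
            = ((pvSig p.1).map (fun t => (t, p.1))).foldl
                (fun d r => d.modify r.1 [] (fun l => l ++ [r.2])) d := by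
          rw [List.foldl_map]
        rw [heq, PySem.Dict.getD_foldl_modify_append] at h'
        rcases List.mem_append.1 h' with h'' | h''
        · exact Or.inl h''
        · right
          rcases List.mem_map.1 h'' with ⟨r, hr, rfl⟩
          rcases List.mem_map.1 (List.mem_of_mem_filter hr) with ⟨u, _, rfl⟩
          exact ⟨p, List.mem_cons_self .., rfl, hp⟩
      · rw [if_neg hp] at h'
        exact Or.inl h'
    · exact Or.inr ⟨q, List.mem_cons_of_mem _ hq, rfl, hm⟩

theorem pvOwners_mem {cs : List (String × List String)} {t x : String}
    (h : x ∈ (pvOwners cs).getD t []) : ∃ p ∈ cs, p.1 = x ∧ pvNumWords p.1 > 1 := by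
  rcases pvOwners_aux cs PySem.Dict.empty t x h with h' | h'
  · simp [pysem] at h'
  · exact h'

theorem pvPlan_target {cs : List (String × List String)} {k t : String}
    (h : pvPlan (pvOwners cs) k = some t) :
    (∃ p ∈ cs, p.1 = t ∧ pvNumWords t > 1) ∧ pvNumWords k = 1 := by
  unfold pvPlan at h
  split_ifs at h with h1 h2 h3
  simp only [Option.some.injEq] at h
  rcases List.length_eq_one_iff.1
    (by omega : ((pvOwners cs).getD ((pvSig k).headD "") []).length = 1) with ⟨a, ha⟩
  have hmem : t ∈ (pvOwners cs).getD ((pvSig k).headD "") [] := by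
    rw [ha] at h ⊢
    simp_all
  rcases pvOwners_mem hmem with ⟨p, hp, hp1, hpm⟩
  exact ⟨⟨p, hp, hp1, hp1 ▸ hpm⟩, by omega⟩

theorem pvKeyUnique {cs : List (String × List String)} (hnd : (cs.map Prod.fst).Nodup)
    {q q' : String × List String} (hq : q ∈ cs) (hq' : q' ∈ cs) (h : q.1 = q'.1) : q = q' :=
  List.inj_on_of_nodup_map hnd hq hq' h

theorem pvFilterMap_keys_sublist {β γ : Type} (cs : List (String × β))
    (f : String × β → Option (String × γ))
    (hf : ∀ p r, f p = some r → r.1 = p.1) :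
    ((cs.filterMap f).map Prod.fst).Sublist (cs.map Prod.fst) := by
  induction cs with
  | nil => simp
  | cons p cs ih =>
    simp only [List.filterMap_cons]
    cases hfp : f p with
    | none => simpa using ih.cons _
    | some r =>
      simp only [List.map_cons, hf p r hfp]
      exact ih.cons₂ _

theorem pvModel_keys_nodup {ow : PySem.Dict String (List String)}
    {cs : List (String × List String)}
    (hnd : (cs.map Prod.fst).Nodup) (P : List String) :
    ((pvModel ow cs P).map Prod.fst).Nodup := by
  refine List.Sublist.nodup ?_ hnd
  refine pvFilterMap_keys_sublist cs _ ?_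
  intro p r h
  split at h
  · cases h
  · cases h; rfl

theorem pvModel_mem {ow : PySem.Dict String (List String)}
    {cs : List (String × List String)} {P : List String}
    {q : String × List String} (hq : q ∈ cs)
    (hc : (decide (q.1 ∈ P) && (pvPlan ow q.1).isSome) = false) :
    (q.1, pvVal ow cs P q) ∈ pvModel ow cs P := by
  refine List.mem_filterMap.2 ⟨q, hq, ?_⟩
  rw [hc]
  rfl

theorem pvMk_contains {cs : List (String × List String)} {x : String} {v : List String}
    (h : (x, v) ∈ cs) : (PySem.Dict.mk cs).contains x = true := by
  simp only [PySem.Dict.contains]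
  exact List.any_eq_true.2 ⟨(x, v), h, by simp⟩

theorem pvAdd_nil_of_not_multi {cs : List (String × List String)} {P : List String} {y : String}
    (hy : ¬ pvNumWords y > 1) : pvAdd (pvOwners cs) cs P y = [] := by
  unfold pvAdd
  rw [List.filter_eq_nil_iff.2, List.map_nil]
  intro q _
  by_cases hq : pvPlan (pvOwners cs) q.1 = some y
  · exact absurd ((pvPlan_target hq).1.choose_spec.2.2) (by simpa using hy)
  · simp [hq]

theorem pvVal_eq_of_not_multi {cs : List (String × List String)} {P : List String}
    {q : String × List String} (hq : ¬ pvNumWords q.1 > 1) :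
    pvVal (pvOwners cs) cs P q = q.2 := by
  unfold pvVal
  rw [pvAdd_nil_of_not_multi hq]
  rfl

theorem pvAdd_extend_none {ow : PySem.Dict String (List String)}
    {cs : List (String × List String)} {P : List String} {k : String}
    (hk : pvPlan ow k = none) (y : String) :
    pvAdd ow cs (P ++ [k]) y = pvAdd ow cs P y := by
  unfold pvAdd
  congr 1
  apply List.filter_congr
  intro q _
  by_cases hqk : q.1 = k
  · simp [hqk, hk]
  · simp [List.mem_append, hqk]

theorem pvStepA_of_plan_none {ow : PySem.Dict String (List String)} {k : String}
    (h : pvPlan ow k = none) (d : PySem.Dict String (List String)) : pvStepA ow d k = d := by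
  simp only [pvStepA]
  unfold pvPlan at h
  split_ifs at h ⊢ <;> simp_all

theorem pvStepA_of_plan_some {ow : PySem.Dict String (List String)} {k t : String}
    (h : pvPlan ow k = some t) (d : PySem.Dict String (List String))
    (hct : d.contains t = true) (hck : d.contains k = true) :
    pvStepA ow d k = (d.modify t [] (fun tl => (d.getD k []).foldl pvDD tl)).erase k := by
  simp only [pvStepA]
  unfold pvPlan at h
  split_ifs at h ⊢ <;> simp_all

-- the `none` merge-plan case: processing k changes nothing in the model either
theorem pvModel_extend_none {ow : PySem.Dict String (List String)}
    {cs : List (String × List String)} {P : List String} {k : String}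
    (hk : pvPlan ow k = none) :
    pvModel ow cs (P ++ [k]) = pvModel ow cs P := by
  unfold pvModel
  apply List.filterMap_congr
  intro q _
  by_cases hqk : q.1 = k
  · simp only [pvVal, pvAdd_extend_none hk, hqk, hk]
    simp
  · simp only [pvVal, pvAdd_extend_none hk]
    simp [List.mem_append, hqk]

theorem pvA_nodup_parts {cs cs₁ cs₂ : List (String × List String)} {p : String × List String}
    (hcs : cs = cs₁ ++ p :: cs₂) (hnd : (cs.map Prod.fst).Nodup) :
    p.1 ∉ cs₁.map Prod.fst ∧ ∀ q ∈ cs₂, q.1 ∉ cs₁.map Prod.fst ∧ q.1 ≠ p.1 := by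
  subst hcs
  rw [List.map_append, List.map_cons, List.nodup_append] at hnd
  obtain ⟨h1, h2, h3⟩ := hnd
  constructor
  · intro hmem
    exact (h3 p.1 hmem p.1 (List.mem_cons.mpr (Or.inl rfl))) rfl
  · intro q hq
    refine ⟨fun hmem => (h3 q.1 hmem q.1 (List.mem_cons.mpr (Or.inr (List.mem_map_of_mem hq)))) rfl, ?_⟩
    intro hq1
    rw [List.nodup_cons] at h2
    exact h2.1 (hq1 ▸ List.mem_map_of_mem hq)

theorem pvAdd_extend_some {ow : PySem.Dict String (List String)}
    {cs cs₁ cs₂ : List (String × List String)} {p : String × List String}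
    (hcs : cs = cs₁ ++ p :: cs₂) (hnd : (cs.map Prod.fst).Nodup) {t : String}
    (hpt : pvPlan ow p.1 = some t) (y : String) :
    pvAdd ow cs (cs₁.map Prod.fst ++ [p.1]) y =
      if y = t then pvAdd ow cs (cs₁.map Prod.fst) y ++ [p.2]
      else pvAdd ow cs (cs₁.map Prod.fst) y := by
  obtain ⟨hkP, hcs₂⟩ := pvA_nodup_parts hcs hnd
  unfold pvAdd
  rw [hcs, List.filter_append, List.filter_cons, List.filter_append, List.filter_cons]
  have hfilter₁ :
      cs₁.filter (fun q => decide (q.1 ∈ cs₁.map Prod.fst ++ [p.1]) && (pvPlan ow q.1 == some y))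
      = cs₁.filter (fun q => decide (q.1 ∈ cs₁.map Prod.fst) && (pvPlan ow q.1 == some y)) := by
    apply List.filter_congr
    intro q hq
    simp [List.mem_append, List.mem_map_of_mem hq]
  have hfilter₂ :
      cs₂.filter (fun q => decide (q.1 ∈ cs₁.map Prod.fst ++ [p.1]) && (pvPlan ow q.1 == some y))
      = cs₂.filter (fun q => decide (q.1 ∈ cs₁.map Prod.fst) && (pvPlan ow q.1 == some y)) := by
    apply List.filter_congr
    intro q hq
    simp [List.mem_append, (hcs₂ q hq).1, (hcs₂ q hq).2]
  rw [hfilter₁, hfilter₂]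
  have h2f : cs₂.filter (fun q => decide (q.1 ∈ cs₁.map Prod.fst) && (pvPlan ow q.1 == some y)) = [] :=
    List.filter_eq_nil_iff.2 (fun q hq => by simp [(hcs₂ q hq).1])
  rw [h2f]
  by_cases hyt : y = t
  · have hbeqt : (pvPlan ow p.1 == some y) = true := by rw [hpt, hyt]; simp
    rw [if_pos hyt]
    simp [hbeqt, hkP, List.mem_append]
  · have hbeq : (pvPlan ow p.1 == some y) = false := by
      rw [hpt]
      simpa using fun h => hyt h.symm
    rw [if_neg hyt]
    simp [hbeq, hkP]

theorem pvStepA_model (cs cs₁ cs₂ : List (String × List String)) (p : String × List String)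
    (hcs : cs = cs₁ ++ p :: cs₂) (hnd : (cs.map Prod.fst).Nodup) :
    pvStepA (pvOwners cs) (PySem.Dict.mk (pvModel (pvOwners cs) cs (cs₁.map Prod.fst))) p.1
      = PySem.Dict.mk (pvModel (pvOwners cs) cs (cs₁.map Prod.fst ++ [p.1])) := by
  obtain ⟨hkP, hcs₂⟩ := pvA_nodup_parts hcs hnd
  have hpcs : p ∈ cs := by rw [hcs]; simp
  cases hplan : pvPlan (pvOwners cs) p.1 with
  | none => rw [pvStepA_of_plan_none hplan, pvModel_extend_none hplan]
  | some t =>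
    obtain ⟨⟨qt, hqt, hqt1, htm⟩, hks⟩ := pvPlan_target hplan
    have htk : t ≠ p.1 := fun h => by rw [h] at htm; omega
    have hplant : pvPlan (pvOwners cs) t = none := by
      unfold pvPlan
      rw [if_pos (by omega)]
    have hmem_t : (t, pvVal (pvOwners cs) cs (cs₁.map Prod.fst) qt)
        ∈ pvModel (pvOwners cs) cs (cs₁.map Prod.fst) := by
      have := pvModel_mem (ow := pvOwners cs) (P := cs₁.map Prod.fst) hqt
        (by rw [hqt1, hplant]; simp)
      rwa [hqt1] at this
    have hmem_k : (p.1, pvVal (pvOwners cs) cs (cs₁.map Prod.fst) p)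
        ∈ pvModel (pvOwners cs) cs (cs₁.map Prod.fst) :=
      pvModel_mem hpcs (by simp [hkP])
    have hndm := pvModel_keys_nodup (ow := pvOwners cs) hnd (cs₁.map Prod.fst)
    have hkeys : (PySem.Dict.mk (pvModel (pvOwners cs) cs (cs₁.map Prod.fst))).keys.Nodup := by
      simpa [PySem.Dict.keys] using hndm
    have hvalk : pvVal (pvOwners cs) cs (cs₁.map Prod.fst) p = p.2 :=
      pvVal_eq_of_not_multi (by omega)
    rw [pvStepA_of_plan_some hplan _ (pvMk_contains hmem_t) (pvMk_contains hmem_k)]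
    have hgetk := PySem.Dict.getD_of_mem_items
      (PySem.Dict.mk (pvModel (pvOwners cs) cs (cs₁.map Prod.fst))) hmem_k hkeys []
    rw [hvalk] at hgetk
    have hgett := PySem.Dict.getD_of_mem_items
      (PySem.Dict.mk (pvModel (pvOwners cs) cs (cs₁.map Prod.fst))) hmem_t hkeys []
    rw [PySem.Dict.modify, hgett, hgetk]
    apply PySem.Dict.ext
    rw [show ∀ (d : PySem.Dict String (List String)) (k : String),
          (d.erase k).items = d.items.filter (fun r => !(r.1 == k)) from fun _ _ => rfl]
    rw [PySem.Dict.items_insert_of_contains _ _ (pvMk_contains hmem_t)]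
    show ((pvModel (pvOwners cs) cs (cs₁.map Prod.fst)).map
        (fun r => if (r.1 == t) = true
          then (t, p.2.foldl pvDD (pvVal (pvOwners cs) cs (cs₁.map Prod.fst) qt)) else r)).filter
          (fun r => !(r.1 == p.1))
      = pvModel (pvOwners cs) cs (cs₁.map Prod.fst ++ [p.1])
    have hval : ∀ y : String × List String,
        pvVal (pvOwners cs) cs (cs₁.map Prod.fst ++ [p.1]) y =
          if y.1 = t then p.2.foldl pvDD (pvVal (pvOwners cs) cs (cs₁.map Prod.fst) y)
          else pvVal (pvOwners cs) cs (cs₁.map Prod.fst) y := by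
      intro y
      unfold pvVal
      rw [pvAdd_extend_some hcs hnd hplan]
      by_cases hyt : y.1 = t
      · simp [hyt, List.foldl_append]
      · simp [hyt]
    unfold pvModel
    rw [List.map_filterMap, List.filter_filterMap]
    apply List.filterMap_congr
    intro q hq
    by_cases hcond : (decide (q.1 ∈ cs₁.map Prod.fst) && (pvPlan (pvOwners cs) q.1).isSome) = true
    · rw [if_pos hcond]
      have : (decide (q.1 ∈ cs₁.map Prod.fst ++ [p.1]) && (pvPlan (pvOwners cs) q.1).isSome) = true := by
        simp only [Bool.and_eq_true, decide_eq_true_eq, List.mem_append] at hcond ⊢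
        exact ⟨Or.inl hcond.1, hcond.2⟩
      rw [if_pos this]
      rfl
    · rw [if_neg hcond]
      by_cases hqk : q.1 = p.1
      · have hsome : (pvPlan (pvOwners cs) p.1).isSome = true := by rw [hplan]; rfl
        have h1 : (decide (q.1 ∈ cs₁.map Prod.fst ++ [p.1]) && (pvPlan (pvOwners cs) q.1).isSome) = true := by
          rw [hqk]
          simp [List.mem_append, hsome]
        rw [if_pos h1]
        have hne : ¬ q.1 = t := by rw [hqk]; exact fun h => htk h.symm
        have hself : (q.1 == p.1) = true := by simpa using hqk
        simp [Option.filter, hne, hself]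
      · by_cases hqt2 : q.1 = t
        · have hqq : q = qt := pvKeyUnique hnd hq hqt (by rw [hqt2, hqt1])
          subst hqq
          have h0 : (decide (q.1 ∈ cs₁.map Prod.fst ++ [p.1]) && (pvPlan (pvOwners cs) q.1).isSome) = false := by
            rw [hqt2, hplant]
            simp
          rw [if_neg (by rw [h0]; simp)]
          rw [hval q, if_pos hqt2]
          simp [Option.filter, hqt2, htk]
        · have hcond' : (decide (q.1 ∈ cs₁.map Prod.fst ++ [p.1]) && (pvPlan (pvOwners cs) q.1).isSome)
              = (decide (q.1 ∈ cs₁.map Prod.fst) && (pvPlan (pvOwners cs) q.1).isSome) := by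
            have hiff : q.1 ∈ cs₁.map Prod.fst ++ [p.1] ↔ q.1 ∈ cs₁.map Prod.fst := by
              simp [List.mem_append, hqk]
            rw [decide_eq_decide.mpr hiff]
          rw [hcond', if_neg hcond]
          rw [hval q, if_neg hqt2]
          simp [Option.filter, hqt2, hqk]

theorem pvA_loop (cs : List (String × List String)) (hnd : (cs.map Prod.fst).Nodup) :
    ∀ cs₂ cs₁, cs = cs₁ ++ cs₂ →
    (cs₂.map Prod.fst).foldl (pvStepA (pvOwners cs))
        (PySem.Dict.mk (pvModel (pvOwners cs) cs (cs₁.map Prod.fst)))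
      = PySem.Dict.mk (pvModel (pvOwners cs) cs (cs.map Prod.fst)) := by
  intro cs₂
  induction cs₂ with
  | nil =>
    intro cs₁ h
    rw [List.append_nil] at h
    subst h
    rfl
  | cons p cs₂ ih =>
    intro cs₁ h
    simp only [List.map_cons, List.foldl_cons]
    rw [pvStepA_model cs cs₁ cs₂ p h hnd]
    have := ih (cs₁ ++ [p]) (by rw [h]; simp)
    rw [List.map_append] at this
    exact this

theorem pvModel_nil (ow : PySem.Dict String (List String)) (cs : List (String × List String)) :
    pvModel ow cs [] = cs := by
  unfold pvModel
  have h : ∀ q ∈ cs, (if decide (q.1 ∈ ([] : List String)) && (pvPlan ow q.1).isSome then none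
      else some (q.1, pvVal ow cs [] q)) = some q := by
    intro q _
    have hv : pvVal ow cs [] q = q.2 := by
      unfold pvVal pvAdd
      simp
    simp [hv]
  rw [List.filterMap_congr h]
  simp

theorem pvA_eq_model (cs : List (String × List String)) (hnd : (cs.map Prod.fst).Nodup) :
    claim_single_word_clusters cs = pvModel (pvOwners cs) cs (cs.map Prod.fst) := by
  simp only [claim_single_word_clusters]
  rw [pvOfList_eq_mk hnd]
  have h0 := pvA_loop cs hnd cs [] rfl
  simp only [List.map_nil] at h0
  rw [pvModel_nil] at h0
  rw [h0]

-- ----- B side -----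

def pvPlanStep (ow : PySem.Dict String (List String)) (d : PySem.Dict String String)
    (p : String × List String) : PySem.Dict String String :=
  match pvPlan ow p.1 with
  | some t => d.insert p.1 t
  | none => d

def pvIncStep (ow : PySem.Dict String (List String)) (d : PySem.Dict String (List String))
    (p : String × List String) : PySem.Dict String (List String) :=
  match pvPlan ow p.1 with
  | some t => d.modify t [] (fun l => l ++ [p.1])
  | none => d

theorem pvB_pair (ow : PySem.Dict String (List String)) (cs : List (String × List String)) :
    ∀ (i : PySem.Dict String String × PySem.Dict String (List String)),
    cs.foldl (fun pi p =>
      if pvNumWords p.1 = 1 then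
        let sig := pvSig p.1
        if sig.length = 1 then
          let cands := ow.getD (sig.headD "") []
          if cands.length = 1 then
            (pi.1.insert p.1 (cands.headD ""), pi.2.modify (cands.headD "") [] (fun l => l ++ [p.1]))
          else pi
        else pi
      else pi) i
    = (cs.foldl (pvPlanStep ow) i.1, cs.foldl (pvIncStep ow) i.2) := by
  induction cs with
  | nil => intro i; rfl
  | cons p cs ih =>
    intro i
    simp only [List.foldl_cons]
    rw [show (if pvNumWords p.1 = 1 then
        let sig := pvSig p.1
        if sig.length = 1 then
          let cands := ow.getD (sig.headD "") []
          if cands.length = 1 then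
            (i.1.insert p.1 (cands.headD ""), i.2.modify (cands.headD "") [] (fun l => l ++ [p.1]))
          else i
        else i
      else i) = (pvPlanStep ow i.1 p, pvIncStep ow i.2 p) from ?_]
    · exact ih (pvPlanStep ow i.1 p, pvIncStep ow i.2 p)
    · simp only [pvPlanStep, pvIncStep, pvPlan]
      by_cases h1 : pvNumWords p.1 = 1 <;>
        by_cases h2 : (pvSig p.1).length = 1 <;>
          by_cases h3 : (ow.getD ((pvSig p.1).headD "") []).length = 1 <;>
            simp_all

theorem pvPlanD_mem (ow : PySem.Dict String (List String)) (cs : List (String × List String)) :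
    ∀ (d : PySem.Dict String String) (x : String),
    x ∈ (cs.foldl (pvPlanStep ow) d).keys ↔
      x ∈ d.keys ∨ ∃ q ∈ cs, q.1 = x ∧ (pvPlan ow q.1).isSome = true := by
  induction cs with
  | nil => intro d x; simp
  | cons p cs ih =>
    intro d x
    simp only [List.foldl_cons]
    rw [ih]
    cases hp : pvPlan ow p.1 with
    | none =>
      simp only [pvPlanStep, hp, List.mem_cons]
      constructor
      · rintro (h | ⟨q, hq, rfl, hs⟩)
        · exact Or.inl h
        · exact Or.inr ⟨q, Or.inr hq, rfl, hs⟩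
      · rintro (h | ⟨q, (rfl | hq), rfl, hs⟩)
        · exact Or.inl h
        · rw [hp] at hs; cases hs
        · exact Or.inr ⟨q, hq, rfl, hs⟩
    | some t =>
      simp only [pvPlanStep, hp, PySem.Dict.mem_keys_insert, List.mem_cons]
      constructor
      · rintro (h | ⟨q, hq, rfl, hs⟩)
        · rcases h with h | h
          · exact Or.inr ⟨p, Or.inl rfl, h.symm, by rw [hp]; rfl⟩
          · exact Or.inl h
        · exact Or.inr ⟨q, Or.inr hq, rfl, hs⟩
      · rintro (h | ⟨q, (rfl | hq), rfl, hs⟩)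
        · exact Or.inl (Or.inr h)
        · exact Or.inl (Or.inl rfl)
        · exact Or.inr ⟨q, hq, rfl, hs⟩

theorem pvIncD_getD (ow : PySem.Dict String (List String)) (cs : List (String × List String)) :
    ∀ (d : PySem.Dict String (List String)) (t : String),
    (cs.foldl (pvIncStep ow) d).getD t []
      = d.getD t [] ++ (cs.filter (fun q => pvPlan ow q.1 == some t)).map Prod.fst := by
  induction cs with
  | nil => intro d t; simp
  | cons p cs ih =>
    intro d t
    simp only [List.foldl_cons, List.filter_cons]
    cases hp : pvPlan ow p.1 with
    | none =>
      rw [show pvIncStep ow d p = d from by simp [pvIncStep, hp], ih]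
      simp
    | some u =>
      rw [show pvIncStep ow d p = d.modify u [] (fun l => l ++ [p.1]) from by simp [pvIncStep, hp]]
      rw [ih, PySem.Dict.getD_modify]
      by_cases htu : t = u
      · subst htu
        simp [hp, List.append_assoc]
      · have hut : ¬ u = t := fun h => htu h.symm
        simp [hp, htu, hut]

theorem pvFoldl_skip {α β : Type} (cs : List α) (c : α → Bool) (g : β → α → β) :
    ∀ i : β, cs.foldl (fun r p => if c p then r else g r p) i = (cs.filter (fun p => !c p)).foldl g i := by
  induction cs with
  | nil => intro i; rfl
  | cons p cs ih =>
    intro i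
    simp only [List.foldl_cons, List.filter_cons]
    cases h : c p with
    | true => simpa using ih i
    | false => simpa using ih (g i p)

theorem pvFilterMapIte {α β : Type} (cs : List α) (c : α → Bool) (g : α → β) :
    cs.filterMap (fun x => if c x then none else some (g x)) = (cs.filter (fun x => !c x)).map g := by
  induction cs with
  | nil => rfl
  | cons p cs ih =>
    simp only [List.filterMap_cons, List.filter_cons]
    by_cases h : c p <;> simp [h, ih]

theorem pvMergeInner (vs : List String) :
    ∀ (acc : List String) (seen : PySem.Set String),
    (∀ x : String, seen.contains x = true ↔ x ∈ acc) →
    (vs.foldl pvMStep (acc, seen)).1 = vs.foldl pvDD acc ∧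
    (∀ x : String, ((vs.foldl pvMStep (acc, seen)).2.contains x = true ↔ x ∈ vs.foldl pvDD acc)) := by
  induction vs with
  | nil =>
    intro acc seen hinv
    exact ⟨rfl, hinv⟩
  | cons a vs ih =>
    intro acc seen hinv
    simp only [List.foldl_cons]
    by_cases hc : seen.contains a = true
    · have ha : a ∈ acc := (hinv a).1 hc
      rw [show pvMStep (acc, seen) a = (acc, seen) from by unfold pvMStep; rw [if_pos hc]]
      rw [show pvDD acc a = acc from by simp [pvDD, ha]]
      exact ih acc seen hinv
    · have ha : a ∉ acc := fun h => hc ((hinv a).2 h)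
      rw [show pvMStep (acc, seen) a = (acc ++ [a], PySem.Set.add seen a) from by unfold pvMStep; rw [if_neg hc]]
      rw [show pvDD acc a = acc ++ [a] from by simp [pvDD, ha]]
      refine ih _ _ ?_
      intro x
      rw [PySem.Set.contains_iff, PySem.Set.mem_add, List.mem_append]
      have hx := hinv x
      rw [PySem.Set.contains_iff] at hx
      simp [hx]

theorem pvMergeOuterEntries (cl : PySem.Dict String (List String)) :
    ∀ (l : List (String × List String)), (∀ q ∈ l, cl.getD q.1 [] = q.2) →
    ∀ (acc : List String) (seen : PySem.Set String),
    (∀ x : String, seen.contains x = true ↔ x ∈ acc) →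
    (l.foldl (fun ms q => (cl.getD q.1 []).foldl pvMStep ms) (acc, seen)).1
      = (l.map Prod.snd).foldl (fun acc vs => vs.foldl pvDD acc) acc := by
  intro l
  induction l with
  | nil => intro _ acc seen _; rfl
  | cons q l ih =>
    intro hv acc seen hinv
    simp only [List.foldl_cons, List.map_cons]
    rw [hv q (List.mem_cons.mpr (Or.inl rfl))]
    obtain ⟨h1, h2⟩ := pvMergeInner q.2 acc seen hinv
    rw [show q.2.foldl pvMStep (acc, seen)
        = (q.2.foldl pvDD acc, (q.2.foldl pvMStep (acc, seen)).2) from by rw [← h1]]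
    exact ih (fun q' hq' => hv q' (List.mem_cons.mpr (Or.inr hq'))) _ _
      (by rw [← h1] at h2 ⊢; exact h2)

theorem pvAdd_keys (ow : PySem.Dict String (List String)) (cs : List (String × List String))
    (k : String) :
    pvAdd ow cs (cs.map Prod.fst) k = (cs.filter (fun q => pvPlan ow q.1 == some k)).map Prod.snd := by
  unfold pvAdd
  congr 1
  apply List.filter_congr
  intro q hq
  simp [List.mem_map_of_mem hq]

theorem pvB_eq_model (cs : List (String × List String)) (hnd : (cs.map Prod.fst).Nodup) :
    claim_single_word_clusters_alt cs = pvModel (pvOwners cs) cs (cs.map Prod.fst) := by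
  simp only [claim_single_word_clusters_alt]
  rw [pvB_pair (pvOwners cs) cs (PySem.Dict.empty, PySem.Dict.empty)]
  have hplanD : ∀ p ∈ cs,
      (cs.foldl (pvPlanStep (pvOwners cs)) PySem.Dict.empty).contains p.1
        = (pvPlan (pvOwners cs) p.1).isSome := by
    intro p hp
    by_cases hs : (pvPlan (pvOwners cs) p.1).isSome = true
    · rw [hs]
      refine (PySem.Dict.contains_iff_mem_keys _ _).2 ?_
      exact (pvPlanD_mem (pvOwners cs) cs PySem.Dict.empty p.1).2
        (Or.inr ⟨p, hp, rfl, hs⟩)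
    · have hs' : (pvPlan (pvOwners cs) p.1).isSome = false := by
        revert hs
        cases pvPlan (pvOwners cs) p.1 <;> simp
      rw [hs']
      by_contra hcon
      have hcon' : (cs.foldl (pvPlanStep (pvOwners cs)) PySem.Dict.empty).contains p.1 = true := by
        revert hcon
        cases (cs.foldl (pvPlanStep (pvOwners cs)) PySem.Dict.empty).contains p.1 <;> simp
      have := (pvPlanD_mem (pvOwners cs) cs PySem.Dict.empty p.1).1
        ((PySem.Dict.contains_iff_mem_keys _ _).1 hcon')
      rcases this with h | ⟨q, hq, hq1, hqs⟩
      · simp [pysem] at h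
      · have : q = p := pvKeyUnique hnd hq hp hq1
        rw [this] at hqs
        rw [hqs] at hs'
        cases hs'
  rw [pvFoldl_skip cs
    (fun p => (cs.foldl (pvPlanStep (pvOwners cs)) PySem.Dict.empty).contains p.1)
    (fun res p => res.insert p.1
      (if pvNumWords p.1 > 1 then
        pvMergeB (PySem.Dict.ofList cs) (cs.foldl (pvIncStep (pvOwners cs)) PySem.Dict.empty) p.1 p.2
      else p.2))
    PySem.Dict.empty]
  rw [PySem.Dict.items_foldl_insert_fresh _ Prod.fst _ PySem.Dict.empty
    (by intro a _; simp [pysem])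
    (((List.filter_sublist ..).map Prod.fst).nodup hnd)]
  rw [show (PySem.Dict.empty : PySem.Dict String (List String)).items = [] from rfl, List.nil_append]
  unfold pvModel
  rw [pvFilterMapIte cs
    (fun p => decide (p.1 ∈ cs.map Prod.fst) && (pvPlan (pvOwners cs) p.1).isSome)
    (fun p => (p.1, pvVal (pvOwners cs) cs (cs.map Prod.fst) p))]
  rw [List.filter_congr (fun p hp => by
      rw [hplanD p hp]
      simp [List.mem_map_of_mem hp] :
    ∀ p ∈ cs, (!(cs.foldl (pvPlanStep (pvOwners cs)) PySem.Dict.empty).contains p.1)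
      = (!(decide (p.1 ∈ cs.map Prod.fst) && (pvPlan (pvOwners cs) p.1).isSome)))]
  refine List.map_congr_left ?_
  intro p hp
  have hpcs : p ∈ cs := List.mem_of_mem_filter hp
  have hmemk : p.1 ∈ cs.map Prod.fst := List.mem_map_of_mem hpcs
  by_cases hm : pvNumWords p.1 > 1
  · rw [if_pos hm]
    have hv' : ∀ q ∈ cs.filter (fun q => pvPlan (pvOwners cs) q.1 == some p.1),
        (PySem.Dict.ofList cs).getD q.1 [] = q.2 := by
      intro q hq
      have hqcs : q ∈ cs := List.mem_of_mem_filter hq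
      refine PySem.Dict.getD_of_mem_items _ ?_ ?_ []
      · rw [pvOfList_items hnd]
        simpa using hqcs
      · rw [show (PySem.Dict.ofList cs).keys = ((PySem.Dict.ofList cs).items).map Prod.fst
            from rfl, pvOfList_items hnd]
        exact hnd
    have hinv0 : ∀ x : String, (PySem.Set.ofList p.2).contains x = true ↔ x ∈ p.2 := by
      intro x
      rw [PySem.Set.contains_iff]
      exact PySem.Set.mem_ofList p.2 x
    have hmerge : pvMergeB (PySem.Dict.ofList cs)
        (cs.foldl (pvIncStep (pvOwners cs)) PySem.Dict.empty) p.1 p.2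
        = pvVal (pvOwners cs) cs (cs.map Prod.fst) p := by
      unfold pvMergeB
      rw [pvIncD_getD (pvOwners cs) cs PySem.Dict.empty p.1,
        show (PySem.Dict.empty : PySem.Dict String (List String)).getD p.1 [] = [] from rfl,
        List.nil_append]
      simp only [List.foldl_map]
      rw [pvMergeOuterEntries (PySem.Dict.ofList cs) _ hv' p.2 (PySem.Set.ofList p.2) hinv0]
      unfold pvVal
      rw [pvAdd_keys]
    rw [hmerge]
  · rw [if_neg hm, pvVal_eq_of_not_multi (cs := cs) (P := cs.map Prod.fst) hm]

-- ===== VERDICT (by name: the statement is the Claim_ definition above) =====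
theorem claim_single_word_clusters_spec : Claim_equal_claim_single_word_clusters := by
  intro cs _ hpre
  unfold Spec_claim_single_word_clusters
  rw [pvA_eq_model cs hpre, pvB_eq_model cs hpre]
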